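-- pv_equiv track=rewrite | github.com/JamesWo/Algorithms | topcoder/division2-2/SpaceWarDiv2.l2.SRM582.py | possible
-- ===== SOURCE A (Python) =====
-- def possible( i, arr ):
--     sendLater = 0
--     for j in range(len(arr)):
--         if arr[j] > i:
--             sendLater += ( arr[j] - i )
--         elif arr[j] < i:
--             free = ( i - arr[j] )
--             subt =min( free, sendLater )
--             sendLater -= subt
--     if sendLater > 0:
--         return False
--     else:
--         return True
-- ===== SOURCE B (Python) =====
-- def possible(i, arr):
--     suffix = 0
--     for x in reversed(arr):
--         suffix += x - i
--         if suffix > 0: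
--             return False
--     return True
-- ===== Notes on version B (the rewrite author's own statement) =====
-- stated objective: alternative
-- what changed: Replaces the left-to-right greedy balance (accumulate excess, absorb it into later slack via min) by a right-to-left suffix-sum test with early exit: satisfiable iff every suffix sum of (x - i) is <= 0.
import Mathlib
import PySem

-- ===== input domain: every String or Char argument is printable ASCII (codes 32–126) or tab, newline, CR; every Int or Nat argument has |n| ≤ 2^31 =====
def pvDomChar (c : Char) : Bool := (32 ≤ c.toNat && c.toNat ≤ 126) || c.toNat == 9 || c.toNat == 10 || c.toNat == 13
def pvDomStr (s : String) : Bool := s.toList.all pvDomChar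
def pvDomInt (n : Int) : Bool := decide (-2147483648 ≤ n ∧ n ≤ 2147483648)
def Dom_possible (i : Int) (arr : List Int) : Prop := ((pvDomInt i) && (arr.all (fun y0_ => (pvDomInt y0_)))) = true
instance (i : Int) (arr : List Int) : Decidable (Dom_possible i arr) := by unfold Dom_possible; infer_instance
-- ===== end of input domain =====

-- B replaces A's left-to-right greedy balance by a right-to-left suffix-sum test
-- with early exit (alternative decomposition, same cost).

-- ===== PORT A =====
-- one loop step of A: excess is accumulated, slack absorbs min(free, sendLater)
def possibleStep (i : Int) (s : Int) (x : Int) : Int :=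
  if x > i then s + (x - i)
  else if x < i then s - min (i - x) s
  else s

def possible (i : Int) (arr : List Int) : Bool :=
  let sendLater := arr.foldl (possibleStep i) 0
  if sendLater > 0 then false else true

-- ===== PORT B =====
-- B's loop: walk reversed(arr), accumulate suffix += x - i, early-return false if > 0
def altLoop (i : Int) : List Int → Int → Bool
  | [], _ => true
  | x :: rest, s =>
      let s' := s + (x - i)
      if s' > 0 then false else altLoop i rest s'

def possible_alt (i : Int) (arr : List Int) : Bool :=
  altLoop i arr.reverse 0

-- ===== PRECONDITION & SPEC =====
def Spec_possible (i : Int) (arr : List Int) (out : Bool) : Prop := out = possible_alt i arr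
instance (i : Int) (arr : List Int) (out : Bool) : Decidable (Spec_possible i arr out) := by unfold Spec_possible; infer_instance

-- ===== CLAIM (what is proved, stated in full; the proofs are below) =====
def Claim_equal_possible : Prop := ∀ (i : Int) (arr : List Int), Dom_possible i arr → Spec_possible i arr (possible i arr)

-- ===== LEMMAS AND PROOFS =====

-- sum of the demands minus capacity
def sumd (i : Int) (l : List Int) : Int := (l.map (fun x => x - i)).sum

theorem sumd_nil (i : Int) : sumd i [] = 0 := rfl

theorem sumd_cons (i : Int) (x : Int) (l : List Int) :
    sumd i (x :: l) = (x - i) + sumd i l := by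
  simp [sumd]

theorem sumd_reverse (i : Int) (l : List Int) : sumd i l.reverse = sumd i l := by
  simp [sumd]

-- A's step equals the max-form step whenever the accumulator is nonnegative
theorem possibleStep_eq_max (i s x : Int) (hs : 0 ≤ s) :
    possibleStep i s x = max 0 (s + (x - i)) := by
  unfold possibleStep
  split_ifs <;> omega

-- A's fold is ≤ 0 iff every nonempty suffix has s-shifted sum ≤ 0 (in the stated form)
theorem foldA_le_iff (i : Int) :
    ∀ (l : List Int) (s : Int), 0 ≤ s →
      (l.foldl (possibleStep i) s ≤ 0 ↔
        (s + sumd i l ≤ 0 ∧ ∀ t, t <:+ l → t ≠ [] → sumd i t ≤ 0)) := by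
  intro l
  induction l with
  | nil =>
      intro s hs
      constructor
      · intro h
        refine ⟨by simpa [sumd_nil] using h, ?_⟩
        intro t ht hne
        exact absurd (List.suffix_nil.mp ht) hne
      · intro h
        simpa [sumd_nil] using h.1
  | cons x l ih =>
      intro s hs
      have hstep : possibleStep i s x = max 0 (s + (x - i)) := possibleStep_eq_max i s x hs
      have hnn : 0 ≤ max 0 (s + (x - i)) := le_max_left _ _
      have hih := ih (max 0 (s + (x - i))) hnn
      constructor
      · intro h
        have h' := hih.mp (by simpa [List.foldl_cons, hstep] using h)
        obtain ⟨h1, h2⟩ := h'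
        have hsum : sumd i l ≤ 0 := by
          rcases eq_or_ne l [] with rfl | hne
          · simp [sumd_nil]
          · exact h2 l (List.suffix_refl l) hne
        refine ⟨by rw [sumd_cons]; omega, ?_⟩
        intro t ht hne
        rcases List.suffix_cons_iff.mp ht with rfl | htl
        · rw [sumd_cons]; omega
        · exact h2 t htl hne
      · intro ⟨h1, h2⟩
        rw [List.foldl_cons, hstep]
        apply hih.mpr
        have hsum : sumd i l ≤ 0 := by
          rcases eq_or_ne l [] with rfl | hne
          · simp [sumd_nil]
          · exact h2 l (List.suffix_cons x l) hne
        have hfull : sumd i (x :: l) ≤ 0 := h2 (x :: l) (List.suffix_refl _) (by simp)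
        rw [sumd_cons] at hfull h1
        exact ⟨by omega, fun t ht hne => h2 t (ht.trans (List.suffix_cons x l)) hne⟩

-- B's loop is true iff every nonempty prefix of the (reversed) list keeps s + sum ≤ 0
theorem altLoop_iff (i : Int) :
    ∀ (r : List Int) (s : Int),
      (altLoop i r s = true ↔ ∀ p, p <+: r → p ≠ [] → s + sumd i p ≤ 0) := by
  intro r
  induction r with
  | nil =>
      intro s
      constructor
      · intro _ p hp hne
        exact absurd (List.prefix_nil.mp hp) hne
      · intro _; rfl
  | cons x r ih =>
      intro s
      constructor
      · intro h p hp hne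
        unfold altLoop at h
        by_cases hgt : s + (x - i) > 0
        · simp [hgt] at h
        · simp only [hgt, ite_false] at h
          rcases p with _ | ⟨y, p'⟩
          · exact absurd rfl hne
          · obtain ⟨rfl, hp'⟩ := List.cons_prefix_cons.mp hp
            rcases eq_or_ne p' [] with rfl | hne'
            · rw [sumd_cons, sumd_nil]; omega
            · have := (ih (s + (y - i))).mp h p' hp' hne'
              rw [sumd_cons]; omega
      · intro h
        unfold altLoop
        have h1 : s + sumd i [x] ≤ 0 := h [x] (by simp) (by simp)
        rw [sumd_cons, sumd_nil] at h1
        have hgt : ¬ (s + (x - i) > 0) := by omega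
        simp only [hgt, ite_false]
        apply (ih (s + (x - i))).mpr
        intro p hp hne
        have := h (x :: p) (List.cons_prefix_cons.mpr ⟨rfl, hp⟩) (by simp)
        rw [sumd_cons] at this
        omega

theorem possible_eq_alt (i : Int) (arr : List Int) :
    possible i arr = possible_alt i arr := by
  have hA : possible i arr = true ↔ arr.foldl (possibleStep i) 0 ≤ 0 := by
    unfold possible
    constructor
    · intro h
      by_contra hc
      simp only [not_le] at hc
      simp [hc] at h
    · intro h
      have : ¬ (arr.foldl (possibleStep i) 0 > 0) := by omega
      simp [this]
  have hB : possible_alt i arr = true ↔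
      ∀ p, p <+: arr.reverse → p ≠ [] → sumd i p ≤ 0 := by
    unfold possible_alt
    rw [altLoop_iff]
    constructor
    · intro h p hp hne; have := h p hp hne; omega
    · intro h p hp hne; have := h p hp hne; omega
  have hiff : possible i arr = true ↔ possible_alt i arr = true := by
    rw [hA, hB, foldA_le_iff i arr 0 le_rfl]
    constructor
    · intro ⟨_, h2⟩ p hp hne
      have hsuf : p.reverse <:+ arr := by
        rw [← List.reverse_reverse arr]
        exact List.reverse_suffix.mpr (by simpa using hp)
      have := h2 p.reverse hsuf (by simpa using hne)
      rwa [sumd_reverse] at this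
    · intro h
      have h2 : ∀ t, t <:+ arr → t ≠ [] → sumd i t ≤ 0 := by
        intro t ht hne
        have hpre : t.reverse <+: arr.reverse := List.reverse_prefix.mpr ht
        have := h t.reverse hpre (by simpa using hne)
        rwa [sumd_reverse] at this
      refine ⟨?_, h2⟩
      rcases eq_or_ne arr [] with rfl | hne
      · simp [sumd_nil]
      · have := h2 arr (List.suffix_refl arr) hne
        omega
  cases hb : possible_alt i arr
  · cases ha : possible i arr
    · rfl
    · exact absurd (hiff.mp ha) (by simp [hb])
  · exact hiff.mpr hb

-- ===== VERDICT (by name: the statement is the Claim_ definition above) =====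
theorem possible_spec : Claim_equal_possible := by
  intro i arr _
  unfold Spec_possible
  exact possible_eq_alt i arr
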